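-- pv_equiv track=rewrite | github.com/MrBrantCode/unitest_baseline | mut_generate/mist_train_cf/cf_53903/solution.py | swap_chars
-- ===== SOURCE A (Python) =====
-- def swap_chars(string):
--     result = ""
--     for i in range(0, len(string), 2):
--         if i+1 < len(string):
--             result += string[i+1] + string[i]
--         else:
--             result += string[i]
--     return result
-- ===== SOURCE B (Python) =====
-- def swap_chars(string):
--     evens = string[0::2]
--     odds = string[1::2]
--     result = []
--     for o, e in zip(odds, evens):
--         result.append(o)
--         result.append(e)
--     if len(evens) > len(odds):
--         result.append(evens[-1])
--     return ''.join(result)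
-- ===== Notes on version B (the rewrite author's own statement) =====
-- stated objective: faster
-- what changed: B slices the string into its even- and odd-index subsequences and zips them back together with an explicit odd-length leftover, instead of A's index loop over range(0,len,2) with repeated string concatenation.
import Mathlib
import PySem

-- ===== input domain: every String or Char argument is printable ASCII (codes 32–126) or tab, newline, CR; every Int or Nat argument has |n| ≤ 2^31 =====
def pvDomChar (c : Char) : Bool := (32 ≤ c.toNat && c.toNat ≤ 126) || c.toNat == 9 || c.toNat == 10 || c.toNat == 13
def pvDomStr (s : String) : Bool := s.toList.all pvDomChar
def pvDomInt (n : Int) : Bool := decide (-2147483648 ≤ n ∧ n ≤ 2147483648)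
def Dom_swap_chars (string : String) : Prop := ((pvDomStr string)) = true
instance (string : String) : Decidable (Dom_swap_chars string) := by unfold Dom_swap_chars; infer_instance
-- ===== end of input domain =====

-- B swaps adjacent pairs by zipping the odd- and even-stride slices of the string instead of
-- A's index loop over range(0, len, 2) with repeated concatenation (alternative decomposition).

-- ===== PORT A =====
-- for i in range(0, len(string), 2): positive step, so the loop runs while i < n, stepping by 2.
def swapCharsGo (cs : List Char) (n i : Int) (res : List Char) : List Char :=
  if i < n then
    if i + 1 < n then
      swapCharsGo cs n (i + 2) (res ++ [PySem.List.pyGetD cs (i + 1) ' ', PySem.List.pyGetD cs i ' '])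
    else
      swapCharsGo cs n (i + 2) (res ++ [PySem.List.pyGetD cs i ' '])
  else res
termination_by (n - i).toNat
decreasing_by all_goals omega

def swap_chars (string : String) : String :=
  String.ofList (swapCharsGo string.toList (string.toList.length : Int) 0 [])

-- ===== PORT B =====
def swap_chars_alt (string : String) : String :=
  let cs := string.toList
  let evens := (PySem.List.slice? cs none none 2).getD []      -- string[0::2]
  let odds := (PySem.List.slice? cs (some 1) none 2).getD []   -- string[1::2]
  let res := (odds.zip evens).foldl (fun acc p => acc ++ [p.1, p.2]) []
  let res := if odds.length < evens.length then
      match PySem.List.pyGet? evens (-1) with                  -- evens[-1]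
      | some c => res ++ [c]
      | none => res
    else res
  String.ofList res

-- ===== PRECONDITION & SPEC =====
def Spec_swap_chars (string : String) (out : String) : Prop := out = swap_chars_alt string
instance (string : String) (out : String) : Decidable (Spec_swap_chars string out) := by unfold Spec_swap_chars; infer_instance

-- ===== CLAIM (what is proved, stated in full; the proofs are below) =====
def Claim_equal_swap_chars : Prop := ∀ (string : String), Dom_swap_chars string → Spec_swap_chars string (swap_chars string)

-- ===== LEMMAS AND PROOFS =====

/-- The common result both ports compute: adjacent characters swapped pairwise. -/
def swapPairs : List Char → List Char
  | [] => []
  | [a] => [a]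
  | a :: b :: t => b :: a :: swapPairs t

/-- Every other element of a list, starting with the first (= xs[0::2]). -/
def everyOther {α : Type} : List α → List α
  | [] => []
  | [a] => [a]
  | a :: _ :: t => a :: everyOther t

lemma filterMap_step2 {α : Type} (cs : List α) :
    List.filterMap (fun k => cs[2 * k]?) (List.range ((cs.length + 1) / 2)) = everyOther cs := by
  induction cs using everyOther.induct with
  | case1 => simp [everyOther]
  | case2 a => simp [everyOther]
  | case3 a b t ih =>
    have hc : ((a :: b :: t).length + 1) / 2 = (t.length + 1) / 2 + 1 := by
      simp; omega
    rw [hc, List.range_succ_eq_map, List.filterMap_cons, List.filterMap_map]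
    simp only [Function.comp]
    have he : (fun k => (a :: b :: t)[2 * Nat.succ k]?) = (fun k => t[2 * k]?) := by
      funext k
      have h2 : 2 * Nat.succ k = 2 * k + 1 + 1 := by omega
      rw [h2]
      simp
    rw [he, ih]
    simp [everyOther]

lemma slice2_zero {α : Type} (cs : List α) :
    PySem.List.slice? cs none none 2 = some (everyOther cs) := by
  rw [PySem.List.slice?]
  simp [PySem.List.sliceIndices]
  cases cs with
  | nil => simp [everyOther]
  | cons a t =>
    rw [if_pos (by simp)]
    have hcnt : ((((a :: t).length : Int) + 2 - 1) / 2).toNat = ((a :: t).length + 1) / 2 := by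
      omega
    rw [hcnt]
    have he : (fun x : Nat => (a :: t)[(2 * (x : Int)).toNat]?) = (fun x => (a :: t)[2 * x]?) := by
      funext x; congr 1
    rw [he, filterMap_step2]

lemma slice2_one {α : Type} (cs : List α) :
    PySem.List.slice? cs (some 1) none 2 = some (everyOther cs.tail) := by
  rw [PySem.List.slice?]
  simp [PySem.List.sliceIndices]
  cases cs with
  | nil => simp [everyOther]
  | cons a t =>
    have hmin : min (1 : Int) (((a :: t).length : Int)) = 1 := by simp
    rw [hmin]
    cases t with
    | nil => simp [everyOther]
    | cons c t2 =>
      rw [if_pos (by simp)]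
      have hcnt : ((((a :: c :: t2).length : Int) - 1 + 2 - 1) / 2).toNat
          = ((c :: t2).length + 1) / 2 := by simp; omega
      rw [hcnt]
      have he : (fun x : Nat => (a :: c :: t2)[((1 : Int) + 2 * (x : Int)).toNat]?)
          = (fun x => (c :: t2)[2 * x]?) := by
        funext x
        have h2 : ((1 : Int) + 2 * (x : Int)).toNat = 2 * x + 1 := by omega
        rw [h2]
        simp
      rw [he, filterMap_step2]
      simp

lemma pyGet?_neg_one {α : Type} (xs : List α) :
    PySem.List.pyGet? xs (-1) = xs.getLast? := by
  simp only [PySem.List.pyGet?, PySem.List.pyIdx?]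
  cases xs with
  | nil => simp
  | cons a t =>
    rw [if_neg (by omega), if_pos (by simp)]
    simp only [Option.bind_some]
    rw [List.getLast?_eq_getElem?]
    congr 1

lemma everyOther_ne_nil {α : Type} (a : α) (l : List α) : everyOther (a :: l) ≠ [] := by
  cases l <;> simp [everyOther]

lemma B_core (cs : List Char) :
    (let evens := everyOther cs
     let odds := everyOther cs.tail
     let res := (odds.zip evens).foldl (fun acc p => acc ++ [p.1, p.2]) []
     if odds.length < evens.length then
        match PySem.List.pyGet? evens (-1) with
        | some c => res ++ [c]
        | none => res
     else res) = swapPairs cs := by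
  induction cs using swapPairs.induct with
  | case1 => simp [everyOther, swapPairs]
  | case2 a => simp [everyOther, swapPairs, pyGet?_neg_one]
  | case3 a b t ih =>
    cases t with
    | nil => simp [everyOther, swapPairs]
    | cons c t2 =>
      simp only [List.tail_cons] at ih ⊢
      show (let evens := a :: everyOther (c :: t2)
            let odds := b :: everyOther t2
            let res := (odds.zip evens).foldl (fun acc p => acc ++ [p.1, p.2]) []
            if odds.length < evens.length then
              match PySem.List.pyGet? evens (-1) with
              | some x => res ++ [x]
              | none => res
            else res) = b :: a :: swapPairs (c :: t2)
      simp only []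
      rw [List.zip_cons_cons, List.foldl_cons,
        PySem.List.foldl_append_eq_flatMap (fun p : Char × Char => [p.1, p.2]),
        pyGet?_neg_one]
      rw [PySem.List.foldl_append_eq_flatMap (fun p : Char × Char => [p.1, p.2]),
        pyGet?_neg_one] at ih
      simp only [List.nil_append] at ih ⊢
      obtain ⟨y, l, hE⟩ : ∃ y l, everyOther (c :: t2) = y :: l := by
        cases hEE : everyOther (c :: t2) with
        | nil => exact absurd hEE (everyOther_ne_nil c t2)
        | cons y l => exact ⟨y, l, rfl⟩
      have hlast : (a :: everyOther (c :: t2)).getLast? = (everyOther (c :: t2)).getLast? := by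
        rw [hE]; exact List.getLast?_cons_cons
      rw [hlast]
      simp only [List.length_cons, Nat.add_lt_add_iff_right]
      by_cases h : (everyOther t2).length < (everyOther (c :: t2)).length
      · rw [if_pos h] at ih ⊢
        cases hg : (everyOther (c :: t2)).getLast? with
        | none => rw [hg] at ih; simpa using ih
        | some x =>
          rw [hg] at ih
          simp only [] at ih ⊢
          rw [← ih]
          simp
      · rw [if_neg h] at ih ⊢
        rw [← ih]
        simp

lemma pyGetD_toNat (cs : List Char) (i : Int) (k : Nat) (d : Char) (h0 : 0 ≤ i)
    (hk : i.toNat = k) (hlt : k < cs.length) : PySem.List.pyGetD cs i d = cs[k] := by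
  subst hk
  exact PySem.List.pyGetD_eq_getElem cs d h0 (by omega)

lemma A_invariant (cs : List Char) (i : Int) (res : List Char) (h0 : 0 ≤ i) :
    swapCharsGo cs (cs.length : Int) i res = res ++ swapPairs (cs.drop i.toNat) := by
  rw [swapCharsGo]
  by_cases h : i < (cs.length : Int)
  · rw [if_pos h]
    have hi : i.toNat < cs.length := by omega
    by_cases h1 : i + 1 < (cs.length : Int)
    · rw [if_pos h1]
      have hi1 : i.toNat + 1 < cs.length := by omega
      rw [A_invariant cs (i + 2) _ (by omega)]
      rw [pyGetD_toNat cs (i + 1) (i.toNat + 1) ' ' (by omega) (by omega) hi1,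
          pyGetD_toNat cs i i.toNat ' ' h0 rfl hi]
      rw [List.drop_eq_getElem_cons hi, List.drop_eq_getElem_cons hi1]
      have h2 : (i + 2).toNat = i.toNat + 1 + 1 := by omega
      rw [h2]
      simp [swapPairs]
    · rw [if_neg h1]
      rw [A_invariant cs (i + 2) _ (by omega)]
      rw [pyGetD_toNat cs i i.toNat ' ' h0 rfl hi]
      have hdrop : cs.drop i.toNat = [cs[i.toNat]] := by
        rw [List.drop_eq_getElem_cons hi]
        simp [List.drop_eq_nil_of_le (by omega : cs.length ≤ i.toNat + 1)]
      have hdrop2 : cs.drop (i + 2).toNat = [] :=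
        List.drop_eq_nil_of_le (by omega)
      rw [hdrop, hdrop2]
      simp [swapPairs]
  · rw [if_neg h]
    have hd : cs.drop i.toNat = [] := List.drop_eq_nil_of_le (by omega)
    simp [hd, swapPairs]
termination_by (cs.length - i).toNat
decreasing_by all_goals omega

-- ===== VERDICT (by name: the statement is the Claim_ definition above) =====
theorem swap_chars_spec : Claim_equal_swap_chars := by
  intro s _
  show swap_chars s = swap_chars_alt s
  rw [swap_chars, swap_chars_alt]
  rw [A_invariant s.toList 0 [] le_rfl]
  simp only [slice2_zero, slice2_one, Option.getD_some]
  rw [B_core s.toList]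
  simp
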